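-- pv_equiv track=rewrite | github.com/Sec32fun32/weave | weave/tests/legacy/test_op_coverage.py | make_error_message
-- ===== SOURCE A (Python) =====
-- def make_error_message(missing_ops, section_name):
--     error_msg = f"{len(missing_ops)} Missing {section_name} Ops: \n"
--     missing_ops.sort()
--     no_prefix_ops = [op for op in missing_ops if "-" not in op]
--     prefixed_ops = [op for op in missing_ops if "-" in op]
--     error_msg += "* No Prefix:\n" + "\n".join(
--         [f"  * [ ] `{op}`" for op in no_prefix_ops]
--     )
--     curr_prefix = None
--     for op in prefixed_ops:
--         op_prefix = op.split("-")[0]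
--         error_msg += "\n"
--         if op_prefix != curr_prefix:
--             curr_prefix = op_prefix
--             error_msg += "* " + op_prefix + ":\n"
--         error_msg += f"  * [ ] `{op}`"
--     return error_msg
-- ===== SOURCE B (Python) =====
-- def make_error_message(missing_ops, section_name):
--     missing_ops.sort()
--     no_prefix = []
--     groups = {}
--     for op in missing_ops:
--         if "-" in op:
--             groups.setdefault(op.split("-")[0], []).append(op)
--         else:
--             no_prefix.append(op)
--     parts = [f"{len(missing_ops)} Missing {section_name} Ops: \n"]
--     parts.append("* No Prefix:\n" + "\n".join(f"  * [ ] `{op}`" for op in no_prefix))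
--     for prefix, ops in groups.items():
--         parts.append("\n* " + prefix + ":\n")
--         parts.append("\n".join(f"  * [ ] `{op}`" for op in ops))
--     return "".join(parts)
-- ===== Notes on version B (the rewrite author's own statement) =====
-- stated objective: alternative
-- what changed: Replaces A's two filter passes plus a stateful string-accumulating loop with a curr_prefix sentinel by one partition pass that builds a no-prefix list and an insertion-ordered dict of prefix groups, followed by a pure rendering join of the groups.
import Mathlib
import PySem

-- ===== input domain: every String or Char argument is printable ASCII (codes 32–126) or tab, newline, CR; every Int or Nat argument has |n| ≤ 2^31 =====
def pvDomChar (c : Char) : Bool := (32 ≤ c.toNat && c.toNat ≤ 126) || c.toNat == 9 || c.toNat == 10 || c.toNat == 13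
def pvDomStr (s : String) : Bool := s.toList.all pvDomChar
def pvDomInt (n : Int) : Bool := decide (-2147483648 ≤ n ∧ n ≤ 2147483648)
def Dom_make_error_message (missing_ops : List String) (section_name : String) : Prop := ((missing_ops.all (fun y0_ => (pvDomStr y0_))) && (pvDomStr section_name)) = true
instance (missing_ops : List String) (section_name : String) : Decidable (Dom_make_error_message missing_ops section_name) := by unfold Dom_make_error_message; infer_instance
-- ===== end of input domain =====

-- B replaces A's two filter passes + stateful curr_prefix string loop by one partition pass into a
-- no-prefix list and an insertion-ordered dict of prefix groups, then a pure rendering join (same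
-- return value; like A, B sorts missing_ops in place — the theorem is about the return value).

-- shared helper: the Python expression op.split("-")[0] (both programs contain it verbatim)
def opPrefix (op : String) : String := ((PySem.Str.split? op "-").getD []).headD ""

-- ===== PORT A =====
-- A's loop body (curr_prefix is st.1, error_msg is st.2)
def stepA (st : Option String × String) (op : String) : Option String × String :=
  let op_prefix := opPrefix op
  let msg := st.2 ++ "\n"
  let st' := if st.1 ≠ some op_prefix then (some op_prefix, msg ++ "* " ++ op_prefix ++ ":\n")
             else (st.1, msg)
  (st'.1, st'.2 ++ ("  * [ ] `" ++ op ++ "`"))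

def make_error_message (missing_ops : List String) (section_name : String) : String :=
  let error_msg := PySem.Int.toStr (missing_ops.length : Int) ++ " Missing " ++ section_name ++ " Ops: \n"
  let sorted_ops := PySem.List.sorted missing_ops (fun x => x) false
  let no_prefix_ops := sorted_ops.filter (fun op => !(PySem.Str.isIn "-" op))
  let prefixed_ops := sorted_ops.filter (fun op => PySem.Str.isIn "-" op)
  let error_msg := error_msg ++ "* No Prefix:\n" ++
    PySem.Str.join "\n" (no_prefix_ops.map (fun op => "  * [ ] `" ++ op ++ "`"))
  (prefixed_ops.foldl stepA ((none : Option String), error_msg)).2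

-- ===== PORT B =====
-- B's partition loop body: no-prefix ops go to the list, prefixed ops into the dict of groups
def stepB (acc : List String × PySem.Dict String (List String)) (op : String) :
    List String × PySem.Dict String (List String) :=
  if PySem.Str.isIn "-" op then (acc.1, acc.2.modify (opPrefix op) [] (fun v => v ++ [op]))
  else (acc.1 ++ [op], acc.2)

def make_error_message_alt (missing_ops : List String) (section_name : String) : String :=
  let sorted_ops := PySem.List.sorted missing_ops (fun x => x) false
  let acc := sorted_ops.foldl stepB ([], PySem.Dict.empty)
  let parts := [PySem.Int.toStr (missing_ops.length : Int) ++ " Missing " ++ section_name ++ " Ops: \n"]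
  let parts := parts ++ ["* No Prefix:\n" ++
    PySem.Str.join "\n" (acc.1.map (fun op => "  * [ ] `" ++ op ++ "`"))]
  let parts := acc.2.items.foldl (fun ps kv =>
    ps ++ ["\n* " ++ kv.1 ++ ":\n",
           PySem.Str.join "\n" (kv.2.map (fun op => "  * [ ] `" ++ op ++ "`"))]) parts
  PySem.Str.join "" parts

-- ===== PRECONDITION & SPEC =====
def Spec_make_error_message (missing_ops : List String) (section_name : String) (out : String) : Prop := out = make_error_message_alt missing_ops section_name
instance (missing_ops : List String) (section_name : String) (out : String) : Decidable (Spec_make_error_message missing_ops section_name out) := by unfold Spec_make_error_message; infer_instance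

-- ===== CLAIM (what is proved, stated in full; the proofs are below) =====
def Claim_equal_make_error_message : Prop := ∀ (missing_ops : List String) (section_name : String), Dom_make_error_message missing_ops section_name → Spec_make_error_message missing_ops section_name (make_error_message missing_ops section_name)

-- ===== LEMMAS AND PROOFS =====

lemma go_spec : ∀ (fuel : ℕ) (l cur : List Char) (acc : List (List Char)), l.length ≤ fuel →
    ∃ rest, PySem.Chars.splitOn.go ['-'] fuel l cur acc =
      acc.reverse ++ (cur.reverse ++ l.takeWhile (fun c => c != '-')) :: rest := by
  intro fuel
  induction fuel with
  | zero =>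
    intro l cur acc h
    have : l = [] := List.length_eq_zero_iff.mp (Nat.le_zero.mp h)
    subst this
    exact ⟨[], by simp [PySem.Chars.splitOn.go]⟩
  | succ n ih =>
    intro l cur acc h
    match l with
    | [] => exact ⟨[], by simp [PySem.Chars.splitOn.go]⟩
    | c :: rest =>
      by_cases hc : c = '-'
      · subst hc
        obtain ⟨r, hr⟩ := ih rest [] (cur.reverse :: acc) (by simpa using h)
        refine ⟨(List.takeWhile (fun c => c != '-') rest) :: r, ?_⟩
        simp [PySem.Chars.splitOn.go, List.isPrefixOf, hr]
      · obtain ⟨r, hr⟩ := ih rest (c :: cur) acc (by simpa using h)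
        refine ⟨r, ?_⟩
        have hpre : ['-'].isPrefixOf (c :: rest) = false := by
          simp [List.isPrefixOf]; exact fun h' => absurd h'.symm hc
        simp only [PySem.Chars.splitOn.go]
        rw [hpre]
        simp only [hr, List.takeWhile]
        have hb : (c != '-') = true := bne_iff_ne.mpr hc
        simp [hb]

lemma splitOn_dash_head (cs : List Char) :
    ∃ rest, PySem.Chars.splitOn cs ['-'] = (cs.takeWhile (fun c => c != '-')) :: rest := by
  obtain ⟨r, hr⟩ := go_spec (cs.length + 1) cs [] [] (by omega)
  exact ⟨r, by simpa [PySem.Chars.splitOn] using hr⟩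

lemma opPrefix_toList (op : String) :
    (opPrefix op).toList = op.toList.takeWhile (fun c => c != '-') := by
  obtain ⟨r, hr⟩ := splitOn_dash_head op.toList
  simp [opPrefix, PySem.Str.split?, PySem.Chars.split?, hr]

-- decomposition of a string containing '-'
lemma dash_decomp {cs : List Char} (h : '-' ∈ cs) :
    cs = cs.takeWhile (fun c => c != '-') ++ '-' :: (cs.dropWhile (fun c => c != '-')).tail ∧
    '-' ∉ cs.takeWhile (fun c => c != '-') := by
  have hd : cs.dropWhile (fun c => c != '-') ≠ [] := by
    intro hnil
    have := List.dropWhile_eq_nil_iff.mp hnil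
    have := this '-' h
    simp at this
  constructor
  · conv_lhs => rw [← List.takeWhile_append_dropWhile (p := fun c => c != '-') (l := cs)]
    congr 1
    obtain ⟨x, t, hxt⟩ := List.exists_cons_of_ne_nil hd
    have hx : (fun c => c != '-') x = false := by
      have := List.head_dropWhile_not (p := fun c => c != '-') (l := cs) hd
      simpa [hxt] using this
    simp at hx
    rw [hxt, hx]
    simp
  · intro hmem
    have := List.mem_takeWhile_imp hmem
    simp at this

lemma lex_between : ∀ (w b : List Char) (ra rc : List Char),
    (w ++ '-' :: ra) < b → b < (w ++ '-' :: rc) → ∃ rb, b = w ++ '-' :: rb := by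
  intro w
  induction w with
  | nil =>
    intro b ra rc h1 h2
    match b with
    | [] => exact absurd h1 (List.not_lt_nil _)
    | x :: rb =>
      simp only [List.nil_append] at h1 h2
      rcases List.cons_lt_cons_iff.mp h1 with h | ⟨he, _⟩
      · rcases List.cons_lt_cons_iff.mp h2 with h' | ⟨he', _⟩
        · exact absurd h' (lt_asymm h)
        · exact absurd h (by simp [he'])
      · exact ⟨rb, by simp [← he]⟩
  | cons u w ih =>
    intro b ra rc h1 h2
    match b with
    | [] => exact absurd h1 (List.not_lt_nil _)
    | x :: rb =>
      simp only [List.cons_append] at h1 h2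
      rcases List.cons_lt_cons_iff.mp h1 with h | ⟨he, h1'⟩
      · rcases List.cons_lt_cons_iff.mp h2 with h' | ⟨he', _⟩
        · exact absurd h' (lt_asymm h)
        · exact absurd h (by simp [he'])
      · rcases List.cons_lt_cons_iff.mp h2 with h' | ⟨he', h2'⟩
        · exact absurd h' (by simp [he])
        · obtain ⟨rb', hrb⟩ := ih rb ra rc h1' h2'
          exact ⟨rb', by simp [← he, hrb]⟩

lemma takeWhile_dash (w rb : List Char) (hw : '-' ∉ w) :
    (w ++ '-' :: rb).takeWhile (fun c => c != '-') = w := by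
  induction w with
  | nil => simp
  | cons u w ih =>
    have hu : u ≠ '-' := fun h => hw (by simp [h])
    simp only [List.cons_append, List.takeWhile_cons, bne_iff_ne, ne_eq, hu,
      not_false_eq_true, if_true, reduceIte]
    rw [ih (fun h => hw (List.mem_cons_of_mem _ h))]

lemma pref_between (a b c : String) (h1 : a ≤ b) (h2 : b ≤ c)
    (ha : '-' ∈ a.toList) (hc : '-' ∈ c.toList)
    (hp : opPrefix a = opPrefix c) : opPrefix b = opPrefix a := by
  rcases eq_or_lt_of_le h1 with he | h1'
  · rw [← he]
  rcases eq_or_lt_of_le h2 with he | h2'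
  · rw [he, hp]
  have hla := String.lt_iff_toList_lt.mp h1'
  have hlc := String.lt_iff_toList_lt.mp h2'
  obtain ⟨hadec, hand⟩ := dash_decomp ha
  obtain ⟨hcdec, hcnd⟩ := dash_decomp hc
  have hwp : a.toList.takeWhile (fun c => c != '-') = c.toList.takeWhile (fun c => c != '-') := by
    have := congrArg String.toList hp
    rwa [opPrefix_toList, opPrefix_toList] at this
  set w := a.toList.takeWhile (fun c => c != '-') with hw
  rw [hadec] at hla
  rw [hcdec, ← hwp] at hlc
  obtain ⟨rb, hrb⟩ := lex_between w b.toList _ _ hla hlc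
  rw [← String.toList_inj, opPrefix_toList, opPrefix_toList, hrb, ← hw, takeWhile_dash _ _ hand]

lemma strJoin_cons_cons (s x y : String) (t : List String) :
    PySem.Str.join s (x :: y :: t) = x ++ s ++ PySem.Str.join s (y :: t) := by
  rw [← String.toList_inj]
  simp [PySem.Str.toList_join, PySem.Chars.join_cons_cons]

lemma strJoin_singleton (s x : String) : PySem.Str.join s [x] = x := by
  rw [← String.toList_inj]
  simp [PySem.Str.toList_join, PySem.Chars.join_singleton]

lemma strJoin_nil (s : String) : PySem.Str.join s [] = "" := by
  rw [← String.toList_inj]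
  simp [PySem.Str.toList_join, PySem.Chars.join_nil]

def concatS (ps : List String) : String := ps.foldl (· ++ ·) ""

lemma foldl_append_str (ps : List String) : ∀ (a : String), ps.foldl (· ++ ·) a = a ++ concatS ps := by
  induction ps with
  | nil => intro a; simp [concatS]
  | cons x t ih =>
    intro a
    show List.foldl (· ++ ·) (a ++ x) t = a ++ List.foldl (· ++ ·) ("" ++ x) t
    rw [ih, ih, String.empty_append, String.append_assoc]

lemma concatS_cons (x : String) (t : List String) : concatS (x :: t) = x ++ concatS t := by
  show List.foldl (· ++ ·) ("" ++ x) t = x ++ concatS t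
  rw [foldl_append_str, String.empty_append]

lemma concatS_append (ps qs : List String) : concatS (ps ++ qs) = concatS ps ++ concatS qs := by
  show List.foldl (· ++ ·) "" (ps ++ qs) = _
  rw [List.foldl_append, foldl_append_str]
  rfl

lemma strJoin_empty (ps : List String) : PySem.Str.join "" ps = concatS ps := by
  induction ps with
  | nil => rw [strJoin_nil]; rfl
  | cons x t ih =>
    match t with
    | [] => rw [strJoin_singleton, concatS_cons]; simp [concatS, String.append_empty]
    | y :: t' =>
      rw [strJoin_cons_cons, concatS_cons, ← ih, String.append_empty]

def lineS (op : String) : String := "  * [ ] `" ++ op ++ "`"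

def joinLines (xs : List String) : String := PySem.Str.join "\n" (xs.map lineS)

def chunkS (l : List String) (k : String) : String :=
  "\n* " ++ k ++ ":\n" ++ joinLines (l.filter (fun x => opPrefix x == k))

def renderD (l : List String) : String :=
  concatS ((PySem.Set.ofList (l.map opPrefix)).map (chunkS l))

lemma joinLines_cons (a : String) (run : List String) :
    joinLines (a :: run) = lineS a ++ concatS (run.map (fun x => "\n" ++ lineS x)) := by
  induction run generalizing a with
  | nil =>
    simp only [joinLines, List.map, strJoin_singleton, List.map_nil]
    rw [show concatS [] = "" from rfl, String.append_empty]
  | cons y t ih =>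
    simp only [joinLines, List.map] at *
    rw [strJoin_cons_cons, ih, concatS_cons]
    simp [String.append_assoc]

lemma foldA_run (k : String) : ∀ (run : List String), (∀ x ∈ run, opPrefix x = k) →
    ∀ E, run.foldl stepA (some k, E) = (some k, E ++ concatS (run.map (fun x => "\n" ++ lineS x))) := by
  intro run
  induction run with
  | nil =>
    intro _ E
    simp only [List.foldl_nil, List.map_nil]
    rw [show concatS [] = "" from rfl, String.append_empty]
  | cons x t ih =>
    intro h E
    have hx : opPrefix x = k := h x (by simp)
    simp only [List.foldl_cons, List.map]
    rw [show stepA (some k, E) x = (some k, E ++ "\n" ++ lineS x) by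
      simp [stepA, hx, lineS]]
    rw [ih (fun y hy => h y (by simp [hy])), concatS_cons]
    simp [String.append_assoc]

lemma foldl_add_const (k : String) : ∀ (us : List String), (∀ u ∈ us, u = k) →
    us.foldl PySem.Set.add [k] = [k] := by
  intro us
  induction us with
  | nil => simp
  | cons u t ih =>
    intro h
    have hu : u = k := h u (by simp)
    subst hu
    simp only [List.foldl_cons]
    rw [show PySem.Set.add [u] u = [u] by simp [PySem.Set.add]]
    exact ih (fun y hy => h y (by simp [hy]))

lemma ofList_front (k : String) (us vs : List String) (hu : ∀ u ∈ us, u = k) (hv : k ∉ vs) :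
    PySem.Set.ofList (k :: (us ++ vs)) = k :: PySem.Set.ofList vs := by
  rw [PySem.Set.ofList_eq_foldl]
  simp only [List.foldl_cons, List.foldl_append]
  rw [show PySem.Set.add [] k = [k] from rfl, foldl_add_const k us hu]
  rw [show List.foldl PySem.Set.add [k] vs = PySem.Set.update [k] vs from rfl]
  rw [PySem.Set.update_eq_append_filter]
  have : List.filter (fun y => !PySem.Set.contains [k] y) (PySem.Set.ofList vs)
      = PySem.Set.ofList vs := by
    rw [List.filter_eq_self]
    intro a ha
    have : a ∈ vs := (PySem.Set.mem_ofList vs a).mp ha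
    have hak : a ≠ k := fun he => hv (he ▸ this)
    simp [PySem.Set.contains, hak]
  rw [this]
  rfl

set_option maxHeartbeats 1000000 in
lemma renderD_decomp (a : String) (t run rest : List String)
    (hrun_eq : run = t.takeWhile (fun x => opPrefix x == opPrefix a))
    (hrest_eq : rest = t.dropWhile (fun x => opPrefix x == opPrefix a))
    (hd : ∀ x ∈ a :: t, '-' ∈ x.toList)
    (hp : (a :: t).Pairwise (· ≤ ·)) :
    (∀ x ∈ rest, opPrefix x ≠ opPrefix a) ∧
    renderD (a :: t) = ("\n* " ++ opPrefix a ++ ":\n" ++ joinLines (a :: run)) ++ renderD rest := by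
  have htdec : run ++ rest = t := by
    rw [hrun_eq, hrest_eq]; exact List.takeWhile_append_dropWhile
  have hrun : ∀ x ∈ run, opPrefix x = opPrefix a := by
    intro x hx
    rw [hrun_eq] at hx
    simpa using List.mem_takeWhile_imp hx
  have hrest : ∀ x ∈ rest, opPrefix x ≠ opPrefix a := by
    intro x hx
    have hne : rest ≠ [] := by intro h; rw [h] at hx; simp at hx
    obtain ⟨y, r, hr⟩ := List.exists_cons_of_ne_nil hne
    rw [hr] at hx
    have hy : opPrefix y ≠ opPrefix a := by
      have h0 := List.head_dropWhile_not (fun x => opPrefix x == opPrefix a) (l := t)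
        (by rw [← hrest_eq, hr]; simp)
      have h1 : (List.dropWhile (fun x => opPrefix x == opPrefix a) t).head
          (by rw [← hrest_eq, hr]; simp) = y := by
        have : List.dropWhile (fun x => opPrefix x == opPrefix a) t = y :: r := by
          rw [← hrest_eq]; exact hr
        simp [this]
      rw [h1] at h0
      simpa using h0
    rcases (List.mem_cons).mp hx with he | hxr
    · exact he ▸ hy
    · intro hxk
      have htdec' : run ++ y :: r = t := by rw [← hr]; exact htdec
      have hyt : y ∈ t := by rw [← htdec']; simp
      have hxt : x ∈ t := by rw [← htdec']; simp [hxr]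
      have hay : a ≤ y := (List.pairwise_cons.mp hp).1 y hyt
      have hyx : y ≤ x := by
        have hpt : t.Pairwise (· ≤ ·) := (List.pairwise_cons.mp hp).2
        rw [← htdec'] at hpt
        have := (List.pairwise_append.mp hpt).2.1
        exact (List.pairwise_cons.mp this).1 x hxr
      exact hy (pref_between a y x hay hyx (hd a (by simp)) (hd x (by simp [hxt])) hxk.symm)
  refine ⟨hrest, ?_⟩
  have hmap : (a :: t).map opPrefix = opPrefix a :: (run.map opPrefix ++ rest.map opPrefix) := by
    simp only [List.map]
    rw [← List.map_append, htdec]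
  have hkeys : PySem.Set.ofList ((a :: t).map opPrefix)
      = opPrefix a :: PySem.Set.ofList (rest.map opPrefix) := by
    rw [hmap]
    exact ofList_front (opPrefix a) _ _
      (by intro u hu; obtain ⟨x, hx, hxe⟩ := List.mem_map.mp hu; rw [← hxe]; exact hrun x hx)
      (by intro hk; obtain ⟨x, hx, hxe⟩ := List.mem_map.mp hk; exact hrest x hx hxe)
  have hfilt_k : (a :: t).filter (fun x => opPrefix x == opPrefix a) = a :: run := by
    simp only [List.filter_cons, beq_self_eq_true, if_true]
    rw [← htdec, List.filter_append]
    rw [List.filter_eq_self.mpr (by intro x hx; simpa using hrun x hx)]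
    rw [List.filter_eq_nil_iff.mpr (by intro x hx; simpa using hrest x hx)]
    simp
  have hfilt_ne : ∀ k', k' ≠ opPrefix a → (a :: t).filter (fun x => opPrefix x == k')
      = rest.filter (fun x => opPrefix x == k') := by
    intro k' hk'
    have hak : (opPrefix a == k') = false := by
      simp only [beq_eq_false_iff_ne, ne_eq]
      exact fun h => hk' h.symm
    simp [List.filter_cons, hak]
    rw [← htdec, List.filter_append]
    rw [List.filter_eq_nil_iff.mpr
      (by intro x hx; simp only [Bool.not_eq_true, beq_eq_false_iff_ne, ne_eq]; intro he; exact hk' (he ▸ (hrun x hx)))]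
    simp
  rw [renderD, hkeys]
  simp only [List.map]
  rw [concatS_cons]
  congr 1
  · rw [chunkS, hfilt_k]
  · rw [renderD]
    congr 1
    apply List.map_congr_left
    intro k' hk'
    have hk'r : k' ≠ opPrefix a := by
      obtain ⟨x, hx, hxe⟩ := List.mem_map.mp ((PySem.Set.mem_ofList _ _).mp hk')
      exact fun he => (hrest x hx) (hxe ▸ he)
    rw [chunkS, chunkS, hfilt_ne k' hk'r]

lemma renderD_nil : renderD [] = "" := rfl

lemma foldA_main : ∀ (n : ℕ) (l : List String), l.length ≤ n → l.Pairwise (· ≤ ·) →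
    (∀ x ∈ l, '-' ∈ x.toList) → ∀ (c : Option String) (E : String),
    (∀ (x : String) (t : List String), l = x :: t → c ≠ some (opPrefix x)) →
    (l.foldl stepA (c, E)).2 = E ++ renderD l := by
  intro n
  induction n with
  | zero =>
    intro l hl _ _ c E _
    have : l = [] := List.length_eq_zero_iff.mp (Nat.le_zero.mp hl)
    subst this
    simp [renderD_nil, String.append_empty]
  | succ n ih =>
    intro l hl hp hd c E hc
    match l with
    | [] => simp [renderD_nil, String.append_empty]
    | a :: t =>
      obtain ⟨hrest, hren⟩ := renderD_decomp a t _ _ rfl rfl hd hp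
      have htdec : (t.takeWhile (fun x => opPrefix x == opPrefix a)) ++
          (t.dropWhile (fun x => opPrefix x == opPrefix a)) = t :=
        List.takeWhile_append_dropWhile
      set run := t.takeWhile (fun x => opPrefix x == opPrefix a) with hrun_eq
      set rest := t.dropWhile (fun x => opPrefix x == opPrefix a) with hrest_eq
      have hrun : ∀ x ∈ run, opPrefix x = opPrefix a := by
        intro x hx
        rw [hrun_eq] at hx
        simpa using List.mem_takeWhile_imp hx
      have hsplit : a :: t = (a :: run) ++ rest := by rw [← htdec]; rfl
      rw [hsplit, List.foldl_append, List.foldl_cons]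
      have hstep : stepA (c, E) a =
          (some (opPrefix a), (((E ++ "\n") ++ "* ") ++ opPrefix a ++ ":\n") ++ lineS a) := by
        have : c ≠ some (opPrefix a) := hc a t rfl
        simp [stepA, this, lineS]
      rw [hstep, foldA_run (opPrefix a) run hrun]
      have hrest_len : rest.length ≤ n := by
        have h1 : t.length ≤ n := by simpa using hl
        have h2 : rest.length ≤ t.length := by
          rw [hrest_eq]; exact (List.dropWhile_sublist _).length_le
        omega
      have hrest_pair : rest.Pairwise (· ≤ ·) := by
        rw [hrest_eq]
        exact (List.pairwise_cons.mp hp).2.sublist (List.dropWhile_sublist _)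
      have hrest_dash : ∀ x ∈ rest, '-' ∈ x.toList := by
        intro x hx
        have : x ∈ t := by rw [← htdec]; exact List.mem_append_right _ hx
        exact hd x (by simp [this])
      have hrest_hd : ∀ (x : String) (t' : List String), rest = x :: t' →
          some (opPrefix a) ≠ some (opPrefix x) := by
        intro x t' hxe h
        exact (hrest x (by simp [hxe])) (Option.some_inj.mp h).symm
      rw [ih rest hrest_len hrest_pair hrest_dash _ _ hrest_hd]
      rw [show (a :: run) ++ rest = a :: t from hsplit.symm, hren, joinLines_cons]
      rw [show ("\n* " : String) = "\n" ++ "* " by decide]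
      simp [String.append_assoc]

lemma foldB_split : ∀ (s : List String) (np : List String) (d : PySem.Dict String (List String)),
    s.foldl stepB (np, d) = (np ++ s.filter (fun op => !(PySem.Str.isIn "-" op)),
      (s.filter (fun op => PySem.Str.isIn "-" op)).foldl
        (fun d op => d.modify (opPrefix op) [] (fun v => v ++ [op])) d) := by
  intro s
  induction s with
  | nil => intro np d; simp
  | cons x t ih =>
    intro np d
    by_cases hx : PySem.Str.isIn "-" x = true
    · simp only [List.foldl_cons, List.filter_cons, hx, Bool.not_true, stepB, if_pos hx]
      rw [ih]
      simp
    · have hx' : PySem.Str.isIn "-" x = false := by simpa using hx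
      simp only [List.foldl_cons, List.filter_cons, hx', Bool.not_false, stepB,
        Bool.false_eq_true, if_false]
      rw [ih]
      simp

lemma dict_getD (l : List String) (c : String) :
    (l.foldl (fun d op => d.modify (opPrefix op) [] (fun v => v ++ [op])) PySem.Dict.empty).getD c []
      = l.filter (fun op => opPrefix op == c) := by
  rw [show (l.foldl (fun d op => d.modify (opPrefix op) [] (fun v => v ++ [op])) PySem.Dict.empty)
      = ((l.map (fun op => (opPrefix op, op))).foldl
          (fun d p => d.modify p.1 [] (fun v => v ++ [p.2])) PySem.Dict.empty) by
    rw [List.foldl_map]]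
  rw [PySem.Dict.getD_foldl_modify_append]
  rw [PySem.Dict.getD_empty]
  rw [List.filter_map]
  simp only [List.map_map]
  rw [List.nil_append]
  simp [Function.comp_def]

lemma dict_keys (l : List String) :
    (l.foldl (fun d op => d.modify (opPrefix op) [] (fun v => v ++ [op])) PySem.Dict.empty).keys
      = PySem.Set.ofList (l.map opPrefix) := by
  rw [PySem.Dict.keys_foldl_modify_key l opPrefix [] (fun _ op => fun v => v ++ [op])]
  rw [PySem.Dict.keys_empty]
  exact PySem.Set.update_nil_left _

lemma dict_keys_nodup (l : List String) :
    (l.foldl (fun d op => d.modify (opPrefix op) [] (fun v => v ++ [op])) PySem.Dict.empty).keys.Nodup := by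
  apply PySem.Dict.nodup_keys_foldl_modify_key
  rw [PySem.Dict.keys_empty]
  exact List.nodup_nil

lemma foldl_two_append {α : Type} (f1 f2 : α → String) :
    ∀ (xs : List α) (ps : List String),
    xs.foldl (fun ps kv => ps ++ [f1 kv, f2 kv]) ps = ps ++ xs.flatMap (fun kv => [f1 kv, f2 kv]) := by
  intro xs
  induction xs with
  | nil => intro ps; simp
  | cons x t ih =>
    intro ps
    simp only [List.foldl_cons, List.flatMap_cons, ih]
    simp

lemma concatS_flatMap_two {α : Type} (f1 f2 : α → String) :
    ∀ (xs : List α),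
    concatS (xs.flatMap (fun kv => [f1 kv, f2 kv])) = concatS (xs.map (fun kv => f1 kv ++ f2 kv)) := by
  intro xs
  induction xs with
  | nil => rfl
  | cons x t ih =>
    simp only [List.flatMap_cons, List.map_cons]
    rw [concatS_append, concatS_cons, concatS_cons, concatS_cons, ih]
    rw [show concatS [] = "" from rfl, String.append_empty, String.append_assoc]


theorem make_error_message_eq_alt (missing_ops : List String) (section_name : String) :
    make_error_message missing_ops section_name = make_error_message_alt missing_ops section_name := by
  unfold make_error_message make_error_message_alt
  dsimp only
  set sorted_ops := PySem.List.sorted missing_ops (fun x => x) false with hs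
  set prefixed := sorted_ops.filter (fun op => PySem.Str.isIn "-" op) with hpref
  have hpair : prefixed.Pairwise (· ≤ ·) := by
    have := PySem.List.sorted_pairwise missing_ops (fun x => x)
    exact List.Pairwise.sublist List.filter_sublist this
  have hdash : ∀ x ∈ prefixed, '-' ∈ x.toList := by
    intro x hx
    have := List.of_mem_filter hx
    have h2 := (PySem.Str.isIn_iff_infix "-" x).mp this
    have : ('-' : Char) ∈ x.toList := by
      rw [show ("-" : String).toList = ['-'] from rfl] at h2
      exact (List.singleton_infix_iff _ _).mp h2
    exact this
  -- A side
  rw [foldA_main prefixed.length prefixed le_rfl hpair hdash _ _ (by intro x t h hc; cases hc)]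
  -- B side
  rw [foldB_split, List.nil_append]
  rw [foldl_two_append, strJoin_empty, concatS_append, concatS_flatMap_two]
  rw [PySem.Dict.items_eq_map_keys _ (dict_keys_nodup prefixed) []]
  rw [dict_keys]
  simp only [List.map_map, Function.comp_def]
  have hmapeq : (PySem.Set.ofList (prefixed.map opPrefix)).map
      (fun k => ("\n* " ++ k ++ ":\n") ++
        PySem.Str.join "\n" (((prefixed.foldl (fun d op => d.modify (opPrefix op) [] (fun v => v ++ [op])) PySem.Dict.empty).getD k []).map (fun op => "  * [ ] `" ++ op ++ "`")))
      = (PySem.Set.ofList (prefixed.map opPrefix)).map (chunkS prefixed) := by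
    apply List.map_congr_left
    intro k _
    rw [dict_getD]
    rfl
  simp only [List.singleton_append]
  rw [show concatS [PySem.Int.toStr (missing_ops.length : Int) ++ " Missing " ++ section_name ++ " Ops: \n",
      "* No Prefix:\n" ++ PySem.Str.join "\n" ((sorted_ops.filter (fun op => !(PySem.Str.isIn "-" op))).map (fun op => "  * [ ] `" ++ op ++ "`"))]
      = (PySem.Int.toStr (missing_ops.length : Int) ++ " Missing " ++ section_name ++ " Ops: \n") ++
        ("* No Prefix:\n" ++ PySem.Str.join "\n" ((sorted_ops.filter (fun op => !(PySem.Str.isIn "-" op))).map (fun op => "  * [ ] `" ++ op ++ "`"))) by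
    rw [concatS_cons, concatS_cons]
    rw [show concatS [] = "" from rfl, String.append_empty]]
  rw [show (PySem.Set.ofList (prefixed.map opPrefix)).map
      (fun k => "\n* " ++ k ++ ":\n" ++
        PySem.Str.join "\n" (((prefixed.foldl (fun d op => d.modify (opPrefix op) [] (fun v => v ++ [op])) PySem.Dict.empty).getD k []).map (fun op => "  * [ ] `" ++ op ++ "`")))
      = (PySem.Set.ofList (prefixed.map opPrefix)).map (chunkS prefixed) from hmapeq]
  rw [show concatS ((PySem.Set.ofList (prefixed.map opPrefix)).map (chunkS prefixed)) = renderD prefixed from rfl]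
  simp [String.append_assoc]
  conv_rhs => rw [← String.append_assoc]
  rw [show (" Ops: \n" ++ "* No Prefix:\n" : String) = " Ops: \n* No Prefix:\n" by decide]

-- ===== VERDICT (by name: the statement is the Claim_ definition above) =====
theorem make_error_message_spec : Claim_equal_make_error_message := by
  intro missing_ops section_name _
  unfold Spec_make_error_message
  exact make_error_message_eq_alt missing_ops section_name
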